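-- pv_equiv track=rewrite | github.com/Avdhesh-Varshney/AI-Code | Python-Scripts/Practice Problems/Python Programs on List/Remove the ith Occurrence of the Given Word in a List.py | removeWord
-- ===== SOURCE A (Python) =====
-- def removeWord(list, word, k):
--     n = 0
--     for i in range(len(list)):
--         if(list[i] == word):
--             n += 1
--             if(n == k):
--                 del(list[i])
--                 return True
--     return False
-- ===== SOURCE B (Python) =====
-- def removeWord(list, word, k):
--     indices = [i for i, x in enumerate(list) if x == word]
--     if 1 <= k <= len(indices):
--         del list[indices[k - 1]]
--         return True
--     return False
-- ===== Notes on version B (the rewrite author's own statement) =====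
-- stated objective: alternative
-- what changed: B first builds the full table of positions of the word with a comprehension and then decides by a single bound check 1<=k<=len(indices) with one delete, instead of A's interleaved count-and-delete scan with early return.
import Mathlib
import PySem

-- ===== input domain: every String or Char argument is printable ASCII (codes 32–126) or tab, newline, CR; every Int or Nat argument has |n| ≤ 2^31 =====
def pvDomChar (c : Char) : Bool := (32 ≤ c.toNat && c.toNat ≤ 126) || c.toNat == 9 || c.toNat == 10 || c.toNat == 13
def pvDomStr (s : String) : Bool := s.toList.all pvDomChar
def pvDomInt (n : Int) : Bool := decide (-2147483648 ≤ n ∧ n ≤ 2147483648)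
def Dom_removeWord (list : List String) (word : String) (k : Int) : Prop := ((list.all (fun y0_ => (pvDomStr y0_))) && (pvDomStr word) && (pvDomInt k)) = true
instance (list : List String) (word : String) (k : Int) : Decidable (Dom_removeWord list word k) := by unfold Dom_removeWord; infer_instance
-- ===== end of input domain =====

-- B separates locating (index table via enumerate) from acting (one bound check + one delete)
-- instead of A's interleaved count-and-delete scan; equivalence proved about the RETURN value
-- only (both Pythons perform the identical in-place deletion).

-- ===== PORT A =====
-- A's for-loop over range(len(list)) with the running counter n; returning True
-- at the n == k match, False when the range is exhausted.
def removeWordLoopA (list : List String) (word : String) (k : Int) : List Int → Int → Bool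
  | [], _ => false
  | i :: rest, n =>
    match PySem.List.pyGet? list i with
    | none => false   -- unreachable: i ∈ range(len(list))
    | some x =>
      if x == word then
        if n + 1 == k then true
        else removeWordLoopA list word k rest (n + 1)
      else removeWordLoopA list word k rest n

def removeWord (list : List String) (word : String) (k : Int) : Bool :=
  removeWordLoopA list word k (PySem.List.pyRange 0 (list.length : Int) 1) 0

-- ===== PORT B =====
def removeWord_alt (list : List String) (word : String) (k : Int) : Bool :=
  let indices : List Int :=
    ((PySem.List.enumerate list 0).filter (fun p => p.2 == word)).map (·.1)
  if 1 ≤ k ∧ k ≤ (indices.length : Int) then true else false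

-- ===== PRECONDITION & SPEC =====
def Spec_removeWord (list : List String) (word : String) (k : Int) (out : Bool) : Prop := out = removeWord_alt list word k
instance (list : List String) (word : String) (k : Int) (out : Bool) : Decidable (Spec_removeWord list word k out) := by unfold Spec_removeWord; infer_instance

-- ===== CLAIM (what is proved, stated in full; the proofs are below) =====
def Claim_equal_removeWord : Prop := ∀ (list : List String) (word : String) (k : Int), Dom_removeWord list word k → Spec_removeWord list word k (removeWord list word k)

-- ===== LEMMAS AND PROOFS =====

-- the number of occurrences of `word` in the suffix of `list` starting at position a
def cntFrom (list : List String) (word : String) (a : Nat) : Int :=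
  ((list.drop a).count word : Int)

lemma cntFrom_nonneg (list : List String) (word : String) (a : Nat) :
    0 ≤ cntFrom list word a := by
  simp [cntFrom]

lemma cntFrom_ge (list : List String) (word : String) (a : Nat) (h : list.length ≤ a) :
    cntFrom list word a = 0 := by
  simp [cntFrom, List.drop_eq_nil_of_le h]

lemma drop_eq_cons (list : List String) (a : Nat) (h : a < list.length) :
    list.drop a = list[a] :: list.drop (a + 1) := by
  exact List.drop_eq_getElem_cons h

-- A's loop from index a with counter n returns true iff n < k ≤ n + (occurrences from a)
lemma loopA_char (list : List String) (word : String) (k : Int) :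
    ∀ (a : Nat) (n : Int),
      removeWordLoopA list word k (PySem.List.pyRange (a : Int) (list.length : Int) 1) n
        = decide (n < k ∧ k ≤ n + cntFrom list word a) := by
  intro a
  induction' hlt : list.length - a using Nat.strong_induction_on with m ih generalizing a
  intro n
  by_cases hcase : a < list.length
  · rw [PySem.List.pyRange_one_cons (by exact_mod_cast hcase)]
    have hget : PySem.List.pyGet? list (a : Int) = some list[a] := by
      simp [PySem.List.pyGet?, PySem.List.pyIdx?, hcase]
    have hcast : ((a : Int) + 1) = ((a + 1 : Nat) : Int) := by push_cast; ring
    have hrec : ∀ n', removeWordLoopA list word k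
        (PySem.List.pyRange ((a + 1 : Nat) : Int) (list.length : Int) 1) n'
        = decide (n' < k ∧ k ≤ n' + cntFrom list word (a + 1)) := by
      intro n'
      exact ih (list.length - (a + 1)) (by omega) (a + 1) rfl n'
    by_cases hw : list[a] = word
    · have hcnt : cntFrom list word a = cntFrom list word (a + 1) + 1 := by
        simp [cntFrom, drop_eq_cons list a hcase, hw]
      by_cases hk : n + 1 = k
      · have : decide (n < k ∧ k ≤ n + cntFrom list word a) = true := by
          have := cntFrom_nonneg list word (a + 1)
          simp only [decide_eq_true_iff]
          constructor <;> omega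
        rw [this]
        simp only [removeWordLoopA, hget]
        have hw' : (list[a] == word) = true := by simpa using hw
        have hk' : ((n + 1 : Int) == k) = true := by simpa using hk
        rw [hw', hk']
        rfl
      · have heq : decide (n + 1 < k ∧ k ≤ n + 1 + cntFrom list word (a + 1))
            = decide (n < k ∧ k ≤ n + cntFrom list word a) := by
          rw [hcnt]
          simp only [decide_eq_decide]
          constructor <;> (intro h; constructor <;> omega)
        simp only [removeWordLoopA, hget, hw, BEq.rfl, if_true, hk, if_false,
          beq_iff_eq, hcast]
        rw [hrec (n + 1), heq]
    · have hcnt : cntFrom list word a = cntFrom list word (a + 1) := by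
        unfold cntFrom
        rw [drop_eq_cons list a hcase, List.count_cons]
        simp [hw]
      have hbeq : (list[a] == word) = false := by simpa using hw
      simp only [removeWordLoopA, hget, hbeq, if_false, Bool.false_eq_true, hcast]
      rw [hrec n, hcnt]
  · rw [PySem.List.pyRange_one_eq_nil (by exact_mod_cast Nat.le_of_not_lt hcase)]
    have h0 : cntFrom list word a = 0 := cntFrom_ge _ _ _ (Nat.le_of_not_lt hcase)
    simp only [removeWordLoopA, h0]
    have : ¬ (n < k ∧ k ≤ n + 0) := by omega
    simp

-- B's index table has exactly count-many entries
lemma indices_length (list : List String) (word : String) :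
    ∀ (s : Int),
    (((PySem.List.enumerate list s).filter (fun p => p.2 == word)).map (·.1)).length
      = list.count word := by
  induction list with
  | nil => intro s; simp [PySem.List.enumerate_nil]
  | cons x xs ih =>
    intro s
    rw [PySem.List.enumerate_cons]
    by_cases hw : x = word
    · simp [hw, ih (s + 1)]
    · have : (x == word) = false := by simpa using hw
      simp [this, hw, ih (s + 1)]

-- ===== VERDICT (by name: the statement is the Claim_ definition above) =====
theorem removeWord_spec : Claim_equal_removeWord := by
  intro list word k _
  unfold Spec_removeWord removeWord
  simp only [removeWord_alt]
  have hA := loopA_char list word k 0 0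
  simp only [Nat.cast_zero] at hA
  rw [hA, indices_length list word 0]
  have h0 : cntFrom list word 0 = (list.count word : Int) := by simp [cntFrom]
  rw [h0]
  by_cases h : 1 ≤ k ∧ k ≤ (list.count word : Int)
  · rw [if_pos h]
    simp only [decide_eq_true_iff]
    omega
  · rw [if_neg h]
    simp only [decide_eq_false_iff_not]
    omega
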